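-- pv_equiv track=rewrite | github.com/karansinghneu/CS-6200-IR | TextProcessing/task2.py | in_link_generator
-- ===== SOURCE A (Python) =====
-- import collections
--
-- def in_link_generator(child_graph):
--     in_link_graph = collections.OrderedDict()
--
--     for key in child_graph.keys():
--         in_link_graph[key] = []
--
--     for key in child_graph.keys():
--         values = child_graph[key]
--         for value in values:
--             if value in in_link_graph:
--                 temp = in_link_graph[value]
--                 temp.append(key)
--                 in_link_graph[value] = temp
--     return in_link_graph
-- ===== SOURCE B (Python) =====
-- import collections
--
-- def in_link_generator(child_graph):
--     # Gather pass: for each node v (in key order), collect every source key k once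
--     # per occurrence of an edge k -> v, scanning the edge list in key order.
--     return collections.OrderedDict(
--         (v, [k for k in child_graph for val in child_graph[k] if val == v])
--         for v in child_graph
--     )
-- ===== Notes on version B (the rewrite author's own statement) =====
-- stated objective: alternative
-- what changed: A scatters each edge into its target's bucket in one pass over all edges with dict lookups and reassignments; B gathers: it builds the result dict directly, computing each node's in-link list by one equality-filtered scan of the edge list per target node.
import Mathlib
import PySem

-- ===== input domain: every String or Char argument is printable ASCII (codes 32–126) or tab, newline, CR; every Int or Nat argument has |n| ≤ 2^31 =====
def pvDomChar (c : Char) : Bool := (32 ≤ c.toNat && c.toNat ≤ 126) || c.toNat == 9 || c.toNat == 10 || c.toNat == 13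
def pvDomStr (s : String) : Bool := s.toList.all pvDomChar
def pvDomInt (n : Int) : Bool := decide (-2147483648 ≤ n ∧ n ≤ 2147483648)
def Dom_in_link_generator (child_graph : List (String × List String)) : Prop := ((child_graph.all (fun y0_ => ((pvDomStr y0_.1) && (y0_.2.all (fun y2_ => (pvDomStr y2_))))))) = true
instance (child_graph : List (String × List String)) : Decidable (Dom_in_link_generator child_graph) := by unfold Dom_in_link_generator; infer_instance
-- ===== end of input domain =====

-- B replaces A's scatter pass (append each edge into its target's bucket) by a gather
-- pass (one equality-filtered scan of the edge list per target node); objective: alternative.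


-- ===== PORT A =====
-- the dict argument, as Python receives it (duplicate keys collapse by overwrite)
def in_link_generator (child_graph : List (String × List String)) : List (String × List String) :=
  let child := PySem.Dict.ofList child_graph
  -- in_link_graph = OrderedDict(); for key in child_graph.keys(): in_link_graph[key] = []
  let init := child.keys.foldl (fun g k => g.insert k ([] : List String)) PySem.Dict.empty
  -- for key in child_graph.keys(): for value in child_graph[key]: if value in in_link_graph: append key
  let final := child.keys.foldl (fun g key =>
    let values := child.getD key []
    values.foldl (fun g value =>
      if g.contains value then
        let temp := g.getD value []
        g.insert value (temp ++ [key])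
      else g) g) init
  final.items

-- ===== PORT B =====
def in_link_generator_alt (child_graph : List (String × List String)) : List (String × List String) :=
  let child := PySem.Dict.ofList child_graph
  child.keys.map (fun v =>
    (v, child.keys.flatMap (fun k =>
      ((child.getD k []).filter (fun val => val == v)).map (fun _ => k))))

-- ===== PRECONDITION & SPEC =====
def Spec_in_link_generator (child_graph : List (String × List String)) (out : List (String × List String)) : Prop := out = in_link_generator_alt child_graph
instance (child_graph : List (String × List String)) (out : List (String × List String)) : Decidable (Spec_in_link_generator child_graph out) := by unfold Spec_in_link_generator; infer_instance

-- ===== CLAIM (what is proved, stated in full; the proofs are below) =====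
def Claim_equal_in_link_generator : Prop := ∀ (child_graph : List (String × List String)), Dom_in_link_generator child_graph → Spec_in_link_generator child_graph (in_link_generator child_graph)

-- ===== LEMMAS AND PROOFS =====

-- one edge step of A's inner loop
def pvStep (key : String) (g : PySem.Dict String (List String)) (value : String) :
    PySem.Dict String (List String) :=
  if g.contains value then g.insert value (g.getD value [] ++ [key]) else g

lemma pvStep_keys (key value : String) (g : PySem.Dict String (List String)) :
    (pvStep key g value).keys = g.keys := by
  unfold pvStep
  split_ifs with h
  · exact PySem.Dict.keys_insert_of_contains g _ h
  · rfl

lemma pvInner_keys (key : String) (vals : List String) (g : PySem.Dict String (List String)) :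
    (vals.foldl (pvStep key) g).keys = g.keys := by
  induction vals generalizing g with
  | nil => rfl
  | cons v vs ih => simp [List.foldl_cons, ih, pvStep_keys]

lemma pvOuter_keys (l : List String) (f : String → List String)
    (g : PySem.Dict String (List String)) :
    (l.foldl (fun g key => (f key).foldl (pvStep key) g) g).keys = g.keys := by
  induction l generalizing g with
  | nil => rfl
  | cons p ps ih => simp [List.foldl_cons, ih, pvInner_keys]

lemma pvStep_getD (key value u : String) (g : PySem.Dict String (List String)) (hu : u ∈ g.keys) :
    (pvStep key g value).getD u [] =
      g.getD u [] ++ (if value = u then [key] else []) := by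
  unfold pvStep
  by_cases hvu : value = u
  · subst hvu
    have hc : g.contains value = true := (PySem.Dict.contains_iff_mem_keys _ _).mpr hu
    simp [hc, PySem.Dict.getD_insert_self]
  · split_ifs with hc
    · simp [PySem.Dict.getD_insert_of_ne _ _ _ (fun h => hvu h.symm)]
    · simp

lemma pvInner_getD (key u : String) (vals : List String)
    (g : PySem.Dict String (List String)) (hu : u ∈ g.keys) :
    (vals.foldl (pvStep key) g).getD u [] =
      g.getD u [] ++ (vals.filter (fun v => v == u)).map (fun _ => key) := by
  induction vals generalizing g with
  | nil => simp
  | cons v vs ih =>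
      have hu' : u ∈ (pvStep key g v).keys := by rw [pvStep_keys]; exact hu
      rw [List.foldl_cons, ih _ hu', pvStep_getD key v u g hu]
      by_cases hvu : v = u <;> simp [hvu]

lemma pvOuter_getD (u : String) (l : List String) (f : String → List String)
    (g : PySem.Dict String (List String)) (hu : u ∈ g.keys) :
    (l.foldl (fun g key => (f key).foldl (pvStep key) g) g).getD u [] =
      g.getD u [] ++ l.flatMap (fun k => ((f k).filter (fun v => v == u)).map (fun _ => k)) := by
  induction l generalizing g with
  | nil => simp
  | cons p ps ih =>
      have hu' : u ∈ ((f p).foldl (pvStep p) g).keys := by rw [pvInner_keys]; exact hu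
      rw [List.foldl_cons, ih _ hu', pvInner_getD _ _ _ _ hu, List.flatMap_cons, List.append_assoc]

lemma pvInit_items (K : List String) (hK : K.Nodup) :
    (K.foldl (fun g k => g.insert k ([] : List String)) PySem.Dict.empty).items =
      K.map (fun k => (k, ([] : List String))) := by
  have := PySem.Dict.items_foldl_insert_fresh (l := K) (k := id)
      (v := fun _ => ([] : List String)) (d := PySem.Dict.empty)
      (by intro a _; simp) (by simpa using hK)
  simpa using this

-- ===== VERDICT (by name: the statement is the Claim_ definition above) =====
theorem in_link_generator_spec : Claim_equal_in_link_generator := by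
  intro cg _
  unfold Spec_in_link_generator in_link_generator in_link_generator_alt
  dsimp only
  set child := PySem.Dict.ofList cg with hchild
  set K := child.keys with hKdef
  have hK : K.Nodup := PySem.Dict.nodup_keys_ofList cg
  set init := K.foldl (fun g k => g.insert k ([] : List String)) PySem.Dict.empty with hinit
  have hinitItems : init.items = K.map (fun k => (k, ([] : List String))) := pvInit_items K hK
  have hinitKeys : init.keys = K := by
    show init.items.map Prod.fst = K
    rw [hinitItems, List.map_map]
    exact List.map_id K
  have hstep : (fun (g : PySem.Dict String (List String)) (key : String) =>
      (child.getD key []).foldl (fun g value =>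
        if g.contains value = true then g.insert value (g.getD value [] ++ [key]) else g) g)
      = fun g key => (child.getD key []).foldl (pvStep key) g := by
    rfl
  rw [hstep]
  set final := K.foldl (fun g key => (child.getD key []).foldl (pvStep key) g) init with hfinal
  have hfinalKeys : final.keys = K := by
    rw [hfinal, pvOuter_keys K (fun key => child.getD key []) init, hinitKeys]
  have hfinalNodup : final.keys.Nodup := by rw [hfinalKeys]; exact hK
  rw [PySem.Dict.items_eq_map_keys final hfinalNodup []]
  rw [hfinalKeys]
  apply List.map_congr_left
  intro u hu
  congr 1
  have hinitGetD : init.getD u [] = [] := by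
    apply PySem.Dict.getD_of_mem_items
    · rw [hinitItems]
      exact List.mem_map.mpr ⟨u, hu, rfl⟩
    · rw [hinitKeys]; exact hK
  rw [hfinal, pvOuter_getD u K (fun key => child.getD key []) init (by rw [hinitKeys]; exact hu),
    hinitGetD, List.nil_append]
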